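-- pv_equiv track=rewrite | github.com/TheSukhSingh/rami-penetrationtools-website | tools/alltools/tools/linkfinder.py | _parse_linkfinder
-- ===== SOURCE A (Python) =====
-- from typing import List, Tuple
--
-- def _parse_linkfinder(text: str) -> Tuple[List[str], List[str]]:
--     endpoints: List[str] = []
--     urls: List[str] = []
--     seen_e, seen_u = set(), set()
--     for ln in (text or "").splitlines():
--         s = (ln or "").strip()
--         if not s:
--             continue
--         # LinkFinder -o cli prints endpoints one per line, usually full or relative paths/URLs
--         # Heuristics: keep absolute http(s) in urls; keep everything in endpoints
--         if s.startswith("http://") or s.startswith("https://"):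
--             if s not in seen_u:
--                 seen_u.add(s); urls.append(s)
--         if s not in seen_e:
--             seen_e.add(s); endpoints.append(s)
--     return endpoints, urls
-- ===== SOURCE B (Python) =====
-- from typing import List, Tuple
--
-- def _parse_linkfinder(text: str) -> Tuple[List[str], List[str]]:
--     # One dedup pass builds endpoints; urls fall out as a filter of endpoints,
--     # since every url line is also an endpoint and dedup keys are identical.
--     endpoints: List[str] = []
--     seen = set()
--     for ln in (text or "").splitlines():
--         s = ln.strip()
--         if s and s not in seen:
--             seen.add(s)
--             endpoints.append(s)
--     urls = [e for e in endpoints if e.startswith("http://") or e.startswith("https://")]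
--     return endpoints, urls
-- ===== Notes on version B (the rewrite author's own statement) =====
-- stated objective: simpler
-- what changed: B drops A's parallel urls accumulator and its seen_u set: it builds only the deduped endpoints list in the line loop, then derives urls by filtering endpoints for the http(s) prefixes, which is exact because every url line is an endpoint and both dedupe on the same string.
import Mathlib
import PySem

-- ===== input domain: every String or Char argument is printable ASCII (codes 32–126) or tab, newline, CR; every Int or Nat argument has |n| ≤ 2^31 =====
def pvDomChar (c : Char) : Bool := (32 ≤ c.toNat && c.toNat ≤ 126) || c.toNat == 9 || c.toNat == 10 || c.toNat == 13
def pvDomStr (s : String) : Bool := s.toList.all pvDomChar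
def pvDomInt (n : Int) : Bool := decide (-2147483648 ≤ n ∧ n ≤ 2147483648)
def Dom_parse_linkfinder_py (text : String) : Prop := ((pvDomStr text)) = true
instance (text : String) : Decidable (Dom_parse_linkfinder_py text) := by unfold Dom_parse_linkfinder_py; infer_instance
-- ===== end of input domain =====

-- B replaces A's parallel urls accumulator (and its seen_u set) by a single
-- endpoints-building loop followed by a filter of endpoints for the http(s) prefixes.

-- ===== PORT A =====
-- A's loop body: state = (endpoints, urls, seen_e, seen_u)
def pvStepA (st : List String × List String × PySem.Set String × PySem.Set String)
    (ln : String) : List String × List String × PySem.Set String × PySem.Set String :=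
  let s := PySem.Str.strip ln
  if s = "" then st
  else
    let eps := st.1
    let urls := st.2.1
    let se := st.2.2.1
    let su := st.2.2.2
    let (urls, su) :=
      if PySem.Str.startswith s "http://" || PySem.Str.startswith s "https://" then
        if PySem.Set.contains su s then (urls, su)
        else (urls ++ [s], PySem.Set.add su s)
      else (urls, su)
    if PySem.Set.contains se s then (eps, urls, se, su)
    else (eps ++ [s], urls, PySem.Set.add se s, su)

def parse_linkfinder_py (text : String) : List String × List String :=
  let st := (PySem.Str.splitlines text).foldl pvStepA ([], [], PySem.Set.empty, PySem.Set.empty)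
  (st.1, st.2.1)

-- ===== PORT B =====
def pvIsUrl (s : String) : Bool :=
  PySem.Str.startswith s "http://" || PySem.Str.startswith s "https://"

-- B's loop body: state = (endpoints, seen)
def pvStepB (st : List String × PySem.Set String) (ln : String) :
    List String × PySem.Set String :=
  let s := PySem.Str.strip ln
  if s ≠ "" ∧ ¬ PySem.Set.contains st.2 s then (st.1 ++ [s], PySem.Set.add st.2 s)
  else st

def parse_linkfinder_py_alt (text : String) : List String × List String :=
  let endpoints := ((PySem.Str.splitlines text).foldl pvStepB ([], PySem.Set.empty)).1
  (endpoints, endpoints.filter pvIsUrl)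

-- ===== PRECONDITION & SPEC =====
def Spec_parse_linkfinder_py (text : String) (out : List String × List String) : Prop := out = parse_linkfinder_py_alt text
instance (text : String) (out : List String × List String) : Decidable (Spec_parse_linkfinder_py text out) := by unfold Spec_parse_linkfinder_py; infer_instance

-- ===== CLAIM (what is proved, stated in full; the proofs are below) =====
def Claim_equal_parse_linkfinder_py : Prop := ∀ (text : String), Dom_parse_linkfinder_py text → Spec_parse_linkfinder_py text (parse_linkfinder_py text)

-- ===== LEMMAS AND PROOFS =====

-- Invariant: A's fold state over any prefix equals (E, E.filter pvIsUrl, E, E.filter pvIsUrl)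
-- where E is B's endpoints and B's seen set is E itself.
theorem pv_fold_inv (l : List String) (E : List String) :
    l.foldl pvStepA (E, E.filter pvIsUrl, E, E.filter pvIsUrl)
      = ((l.foldl pvStepB (E, E)).1, (l.foldl pvStepB (E, E)).1.filter pvIsUrl,
         (l.foldl pvStepB (E, E)).1, (l.foldl pvStepB (E, E)).1.filter pvIsUrl) := by
  induction l generalizing E with
  | nil => simp
  | cons ln tl ih =>
    simp only [List.foldl_cons]
    have hstepB : pvStepB (E, E) ln =
        (if PySem.Str.strip ln ≠ "" ∧ ¬ PySem.Set.contains E (PySem.Str.strip ln)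
          then (E ++ [PySem.Str.strip ln], PySem.Set.add E (PySem.Str.strip ln)) else (E, E)) := by
      simp [pvStepB]
    by_cases hs : PySem.Str.strip ln = ""
    · have hA : pvStepA (E, E.filter pvIsUrl, E, E.filter pvIsUrl) ln
          = (E, E.filter pvIsUrl, E, E.filter pvIsUrl) := by
        simp [pvStepA, hs]
      have hB : pvStepB (E, E) ln = (E, E) := by simp [hstepB, hs]
      rw [hA, hB]; exact ih E
    · by_cases hmem : PySem.Str.strip ln ∈ E
      · -- already seen: both steps leave the state unchanged
        have hA : pvStepA (E, E.filter pvIsUrl, E, E.filter pvIsUrl) ln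
            = (E, E.filter pvIsUrl, E, E.filter pvIsUrl) := by
          by_cases hu : pvIsUrl (PySem.Str.strip ln) <;>
          · have hu' := hu
            simp only [pvIsUrl] at hu'
            simp at hu'
            simp [pvStepA, hs, hu, hu', hmem]
        have hB : pvStepB (E, E) ln = (E, E) := by simp [hstepB, hmem]
        rw [hA, hB]; exact ih E
      · -- new endpoint
        have hmemF : PySem.Str.strip ln ∉ E.filter pvIsUrl := by
          intro h; exact hmem (List.mem_of_mem_filter h)
        have hfilter : (E ++ [PySem.Str.strip ln]).filter pvIsUrl
            = E.filter pvIsUrl ++ if pvIsUrl (PySem.Str.strip ln)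
                then [PySem.Str.strip ln] else [] := by
          by_cases hu : pvIsUrl (PySem.Str.strip ln) <;> simp [List.filter_append, hu]
        have hA : pvStepA (E, E.filter pvIsUrl, E, E.filter pvIsUrl) ln
            = (E ++ [PySem.Str.strip ln], (E ++ [PySem.Str.strip ln]).filter pvIsUrl,
               E ++ [PySem.Str.strip ln], (E ++ [PySem.Str.strip ln]).filter pvIsUrl) := by
          by_cases hu : pvIsUrl (PySem.Str.strip ln) <;>
          · have hu' := hu
            simp only [pvIsUrl] at hu'
            simp at hu'
            simp [pvStepA, hs, hu, hu', hfilter,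
              PySem.Set.add, PySem.Set.contains, hmem, hmemF]
        have hB : pvStepB (E, E) ln
            = (E ++ [PySem.Str.strip ln], E ++ [PySem.Str.strip ln]) := by
          simp [hstepB, hs, PySem.Set.add, PySem.Set.contains, hmem]
        rw [hA, hB]; exact ih (E ++ [PySem.Str.strip ln])

-- ===== VERDICT (by name: the statement is the Claim_ definition above) =====
theorem parse_linkfinder_py_spec : Claim_equal_parse_linkfinder_py := by
  intro text _
  unfold Spec_parse_linkfinder_py parse_linkfinder_py parse_linkfinder_py_alt
  have h := pv_fold_inv (PySem.Str.splitlines text) []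
  simp only [List.filter_nil] at h
  simp [PySem.Set.empty, h]
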